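-- pv_equiv track=rewrite | github.com/SamMaschmann/AR_Project | project.py | pure
-- ===== SOURCE A (Python) =====
-- def pure(numVar, clauses, M):
--     pure_literals = set()
--     for i in range(1, numVar+1):
--         if (i in (item for sublist in clauses for item in sublist) and -i not in (item for sublist in clauses for item in sublist)):
--             pure_literals.add(i)
--         elif (-i in (item for sublist in clauses for item in sublist) and i not in (item for sublist in clauses for item in sublist)):
--             pure_literals.add(-i)
--
--     for literal in pure_literals:
--         M[abs(literal) - 1] = literal
--     return M
-- ===== SOURCE B (Python) =====
-- def pure(numVar, clauses, M):
--     literals = set()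
--     for clause in clauses:
--         literals.update(clause)
--     for l in literals:
--         if -l not in literals and 1 <= abs(l) <= numVar:
--             M[abs(l) - 1] = l
--     return M
-- ===== Notes on version B (the rewrite author's own statement) =====
-- stated objective: faster
-- what changed: B builds the set of occurring literals in one pass over the clauses and iterates over that set with an in-set purity test, instead of A's loop over every variable 1..numVar that re-scans all clauses twice per variable via fresh generators.
import Mathlib
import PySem

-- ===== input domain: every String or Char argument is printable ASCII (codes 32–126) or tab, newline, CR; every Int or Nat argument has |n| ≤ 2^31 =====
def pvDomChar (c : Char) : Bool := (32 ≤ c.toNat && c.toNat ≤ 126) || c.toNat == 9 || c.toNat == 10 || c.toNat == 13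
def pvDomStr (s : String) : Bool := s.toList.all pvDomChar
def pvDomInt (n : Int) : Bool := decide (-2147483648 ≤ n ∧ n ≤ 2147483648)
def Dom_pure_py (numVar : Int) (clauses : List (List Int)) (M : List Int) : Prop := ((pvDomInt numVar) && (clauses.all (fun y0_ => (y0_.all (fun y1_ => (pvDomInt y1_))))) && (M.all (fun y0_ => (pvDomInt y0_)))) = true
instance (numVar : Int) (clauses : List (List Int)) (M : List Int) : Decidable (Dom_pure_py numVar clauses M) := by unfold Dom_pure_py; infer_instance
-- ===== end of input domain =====

-- B builds the set of occurring literals in one pass and iterates over that set, instead of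
-- scanning the whole range 1..numVar with two fresh generator passes over all clauses per variable.
-- Both A and B mutate M in place in Python; the equivalence proved here is about the return value.

-- ===== PORT A =====
-- the body of A's range loop: try to add i (or -i) to the pure-literal set
def pvStep (flat : List Int) (s : PySem.Set Int) (i : Int) : PySem.Set Int :=
  if flat.contains i && !(flat.contains (-i)) then PySem.Set.add s i
  else if flat.contains (-i) && !(flat.contains i) then PySem.Set.add s (-i)
  else s

def pure_py (numVar : Int) (clauses : List (List Int)) (M : List Int) : List Int :=
  let flat : List Int := clauses.flatMap id          -- the generator (item for sublist in clauses for item in sublist)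
  let pure_literals : PySem.Set Int :=
    (PySem.List.pyRange 1 (numVar + 1) 1).foldl (pvStep flat) PySem.Set.empty
  -- iterating the set writes to pairwise distinct indices, so the result is order-independent
  pure_literals.foldl (fun m l => PySem.List.pySetD m ((l.natAbs : Int) - 1) l) M

-- ===== PORT B =====
def pure_py_alt (numVar : Int) (clauses : List (List Int)) (M : List Int) : List Int :=
  let literals : PySem.Set Int :=
    clauses.foldl (fun s c => PySem.Set.update s c) PySem.Set.empty
  literals.foldl
    (fun m l =>
      if !(PySem.Set.contains literals (-l)) && decide (1 ≤ (l.natAbs : Int) ∧ (l.natAbs : Int) ≤ numVar)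
      then PySem.List.pySetD m ((l.natAbs : Int) - 1) l
      else m)
    M

-- ===== PRECONDITION & SPEC =====
-- Pre_ excludes exactly the inputs on which the Python A raises IndexError: some pure literal
-- whose variable index exceeds len(M).  (Python B raises on the same inputs.)
def Pre_pure_py (numVar : Int) (clauses : List (List Int)) (M : List Int) : Prop :=
  ∀ l ∈ clauses.flatMap id,
    (1 ≤ (l.natAbs : Int) ∧ (l.natAbs : Int) ≤ numVar ∧ (-l) ∉ clauses.flatMap id) →
      (l.natAbs : Int) ≤ (M.length : Int)
instance (numVar : Int) (clauses : List (List Int)) (M : List Int) : Decidable (Pre_pure_py numVar clauses M) := by unfold Pre_pure_py; infer_instance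

def pvWitness_pure_py : Int × List (List Int) × List Int := (2, [[1, -2], [-2]], [0, 0])

def Spec_pure_py (numVar : Int) (clauses : List (List Int)) (M : List Int) (out : List Int) : Prop := out = pure_py_alt numVar clauses M
instance (numVar : Int) (clauses : List (List Int)) (M : List Int) (out : List Int) : Decidable (Spec_pure_py numVar clauses M out) := by unfold Spec_pure_py; infer_instance

-- ===== CLAIM (what is proved, stated in full; the proofs are below) =====
def Claim_equal_pure_py : Prop := ∀ (numVar : Int) (clauses : List (List Int)) (M : List Int), Dom_pure_py numVar clauses M → Pre_pure_py numVar clauses M → Spec_pure_py numVar clauses M (pure_py numVar clauses M)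

-- ===== LEMMAS AND PROOFS =====

-- B's one-pass union over the clauses is set(flattened clauses)
theorem foldl_update_gen (clauses : List (List Int)) (s : PySem.Set Int) :
    clauses.foldl (fun s c => PySem.Set.update s c) s
      = PySem.Set.update s (clauses.flatMap id) := by
  induction clauses generalizing s with
  | nil => simp [PySem.Set.update]
  | cons c cs ih =>
    simp only [List.foldl_cons, List.flatMap_cons, id]
    rw [ih, PySem.Set.update_append]

theorem foldl_update_eq_ofList_flatMap (clauses : List (List Int)) :
    clauses.foldl (fun s c => PySem.Set.update s c) PySem.Set.empty
      = PySem.Set.ofList (clauses.flatMap id) := by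
  rw [foldl_update_gen, PySem.Set.update_empty]

theorem pvStep_nodup (flat : List Int) (s : PySem.Set Int) (i : Int) (hs : s.Nodup) :
    (pvStep flat s i).Nodup := by
  unfold pvStep; split_ifs <;> first | exact PySem.Set.nodup_add _ _ hs | exact hs

theorem mem_pvStep (flat : List Int) (s : PySem.Set Int) (i l : Int) :
    l ∈ pvStep flat s i ↔ l ∈ s ∨ (i ∈ flat ∧ (-i) ∉ flat ∧ l = i) ∨ ((-i) ∈ flat ∧ i ∉ flat ∧ l = -i) := by
  unfold pvStep
  split_ifs with h1 h2 <;>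
    simp [PySem.Set.mem_add] at * <;> tauto

theorem mem_fold_pvStep (flat : List Int) (r : List Int) (s : PySem.Set Int) (l : Int) :
    l ∈ r.foldl (pvStep flat) s
      ↔ l ∈ s ∨ ∃ i ∈ r, ((i ∈ flat ∧ (-i) ∉ flat ∧ l = i) ∨ ((-i) ∈ flat ∧ i ∉ flat ∧ l = -i)) := by
  induction r generalizing s with
  | nil => simp
  | cons a r ih =>
    rw [List.foldl_cons, ih, mem_pvStep]
    simp only [List.exists_mem_cons_iff]
    rw [or_assoc]

theorem nodup_fold_pvStep (flat : List Int) (r : List Int) (s : PySem.Set Int) (hs : s.Nodup) :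
    (r.foldl (pvStep flat) s : List Int).Nodup := by
  induction r generalizing s with
  | nil => exact hs
  | cons a r ih => exact ih _ (pvStep_nodup _ _ _ hs)

-- the pure-literal set A builds, characterised by membership
theorem mem_A_list (numVar : Int) (flat : List Int) (l : Int) :
    l ∈ (PySem.List.pyRange 1 (numVar + 1) 1).foldl (pvStep flat) PySem.Set.empty
      ↔ (1 ≤ (l.natAbs : Int) ∧ (l.natAbs : Int) ≤ numVar ∧ l ∈ flat ∧ (-l) ∉ flat) := by
  rw [mem_fold_pvStep]
  simp only [PySem.Set.empty, List.not_mem_nil, false_or, PySem.List.mem_pyRange_one]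
  constructor
  · rintro ⟨i, hi, (⟨h1, h2, rfl⟩ | ⟨h1, h2, rfl⟩)⟩
    · exact ⟨by omega, by omega, h1, h2⟩
    · refine ⟨by omega, by omega, h1, by simpa using h2⟩
  · rintro ⟨h1, h2, h3, h4⟩
    by_cases hl : 0 ≤ l
    · exact ⟨l, ⟨by omega, by omega⟩, Or.inl ⟨h3, h4, rfl⟩⟩
    · refine ⟨-l, ⟨by omega, by omega⟩, Or.inr ⟨by simpa using h3, h4, by ring⟩⟩

-- the assignment step commutes on two distinct pure literals (their variable indices differ)
theorem g_comm (flat : List Int) (numVar : Int) (x y : Int)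
    (hx : 1 ≤ (x.natAbs : Int) ∧ (x.natAbs : Int) ≤ numVar ∧ x ∈ flat ∧ (-x) ∉ flat)
    (hy : 1 ≤ (y.natAbs : Int) ∧ (y.natAbs : Int) ≤ numVar ∧ y ∈ flat ∧ (-y) ∉ flat)
    (z : List Int) :
    PySem.List.pySetD (PySem.List.pySetD z ((x.natAbs : Int) - 1) x) ((y.natAbs : Int) - 1) y
      = PySem.List.pySetD (PySem.List.pySetD z ((y.natAbs : Int) - 1) y) ((x.natAbs : Int) - 1) x := by
  by_cases hxy : x = y
  · rw [hxy]
  · have hne : x.natAbs ≠ y.natAbs := by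
      intro h
      rcases hx with ⟨hx1, -, hx3, hx4⟩
      rcases hy with ⟨-, -, hy3, hy4⟩
      have : x = y ∨ x = -y := by omega
      rcases this with h | rfl
      · exact hxy h
      · exact hx4 (by simpa using hy3)
    have ex : (0:Int) ≤ (x.natAbs : Int) - 1 := by omega
    have ey : (0:Int) ≤ (y.natAbs : Int) - 1 := by omega
    rw [PySem.List.pySetD_of_nonneg (h := ex), PySem.List.pySetD_of_nonneg (h := ey),
        PySem.List.pySetD_of_nonneg (h := ey), PySem.List.pySetD_of_nonneg (h := ex)]
    exact List.set_comm _ _ (by omega)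

-- ===== VERDICT (by name: the statement is the Claim_ definition above) =====
theorem pure_py_spec : Claim_equal_pure_py := by
  intro numVar clauses M _ _
  unfold Spec_pure_py pure_py pure_py_alt
  rw [foldl_update_eq_ofList_flatMap]
  set flat : List Int := clauses.flatMap id with hflat
  set S : PySem.Set Int := PySem.Set.ofList flat with hS
  set p : Int → Bool :=
    fun l => !(PySem.Set.contains S (-l)) && decide (1 ≤ (l.natAbs : Int) ∧ (l.natAbs : Int) ≤ numVar) with hp
  rw [show (S.foldl
      (fun m l => if p l then PySem.List.pySetD m ((l.natAbs : Int) - 1) l else m) M)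
    = (S.filter p).foldl (fun m l => PySem.List.pySetD m ((l.natAbs : Int) - 1) l) M
    from (List.foldl_filter).symm]
  have memB : ∀ l, l ∈ S.filter p
      ↔ (1 ≤ (l.natAbs : Int) ∧ (l.natAbs : Int) ≤ numVar ∧ l ∈ flat ∧ (-l) ∉ flat) := by
    intro l
    simp only [List.mem_filter, hp, hS, Bool.and_eq_true, Bool.not_eq_true',
      PySem.Set.contains_eq_listContains, decide_eq_true_eq]
    constructor
    · rintro ⟨h1, h2, h3⟩
      refine ⟨h3.1, h3.2, by simpa [PySem.Set.mem_ofList] using h1, ?_⟩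
      intro hm
      have : (PySem.Set.ofList flat).contains (-l) = true := by
        simp [PySem.Set.mem_ofList, hm]
      simp [PySem.Set.contains_eq_listContains] at this
      simp [this] at h2
    · rintro ⟨h1, h2, h3, h4⟩
      refine ⟨by simpa [PySem.Set.mem_ofList] using h3, ?_, h1, h2⟩
      by_contra hc
      have : (-l) ∈ PySem.Set.ofList flat := by
        have := PySem.Set.contains_iff (PySem.Set.ofList flat) (-l)
        simp [PySem.Set.contains_eq_listContains] at this ⊢
        simp only [Bool.not_eq_false] at hc
        simpa [this] using hc
      exact h4 (by simpa [PySem.Set.mem_ofList] using this)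
  have hperm : List.Perm
      ((PySem.List.pyRange 1 (numVar + 1) 1).foldl (pvStep flat) PySem.Set.empty)
      (S.filter p) := by
    refine (List.perm_ext_iff_of_nodup
      (nodup_fold_pvStep flat _ _ List.nodup_nil)
      ((PySem.Set.nodup_ofList flat).filter p)).mpr ?_
    intro a
    exact Iff.trans (mem_A_list numVar flat a) ((memB a).symm)
  exact hperm.foldl_eq'
    (fun x hx y hy z => g_comm flat numVar x y
      ((mem_A_list numVar flat x).1 hx) ((mem_A_list numVar flat y).1 hy) z) M
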